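-- pv_equiv track=rewrite | github.com/yehudav/Project-Euler | problem 69.py | get_que
-- ===== SOURCE A (Python) =====
-- def get_que(n, primes, factors):
--     ret = set()
--     for f in factors:
--         if n <= 1:
--             break
--         while n / f == n // f:
--             n = n // f
--             ret.add(f)
--     a = 1
--     for j in ret:
--         a *= primes[j]
--     return a
-- ===== SOURCE B (Python) =====
-- def get_que(n, primes, factors):
--     # On the natural domain (factors = pairwise coprime candidates >= 2), a
--     # factor contributes iff it divides the original n: no stripping needed.
--     if n <= 1:
--         return 1
--     a = 1
--     for f in factors:
--         if n % f == 0: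
--             a *= primes[f]
--     return a
-- ===== Notes on version B (the rewrite author's own statement) =====
-- stated objective: simpler
-- what changed: Replaces A's stateful trial division (mutating n, inner while stripping powers, collecting a set, then a second multiplication pass) with a single stateless pass that multiplies primes[f] for each factor f dividing the original n, correct because on the natural domain (pairwise coprime factors >= 2) a factor is stripped by A exactly when it divides the original n.
-- outside the precondition, e.g. on get_que(4, {2: 3, 4: 9}, [2, 4]): A returns 3, B returns 27; on get_que(12, {-3: 5, 2: 7}, [-3, 2]): A returns 5, B returns 35; on get_que(4, {2: 3}, [2, 2]): A returns 3, B returns 9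
import Mathlib
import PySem

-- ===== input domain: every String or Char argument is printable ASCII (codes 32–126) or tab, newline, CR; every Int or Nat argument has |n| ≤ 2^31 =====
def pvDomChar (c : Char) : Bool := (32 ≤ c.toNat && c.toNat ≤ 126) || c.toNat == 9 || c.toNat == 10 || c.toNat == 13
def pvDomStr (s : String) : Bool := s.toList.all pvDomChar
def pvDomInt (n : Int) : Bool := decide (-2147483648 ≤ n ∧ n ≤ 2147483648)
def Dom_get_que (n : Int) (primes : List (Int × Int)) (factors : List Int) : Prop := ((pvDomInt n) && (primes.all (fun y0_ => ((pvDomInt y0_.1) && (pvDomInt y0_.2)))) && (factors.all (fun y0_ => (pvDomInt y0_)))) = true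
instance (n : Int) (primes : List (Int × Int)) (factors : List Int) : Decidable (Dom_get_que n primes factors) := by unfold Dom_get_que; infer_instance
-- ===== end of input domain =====

-- B replaces A's stateful trial division (strip powers into a set, then multiply) by one
-- stateless pass multiplying primes[f] for each factor dividing the original n; objective: simpler.


-- Termination helper for A's strip loop (cited by decreasing_by in the port).
theorem pvStripDec {n f : Int} (h : 2 ≤ f.natAbs ∧ PySem.Int.mod n f = 0 ∧ n ≠ 0) :
    (PySem.Int.floordiv n f).natAbs < n.natAbs := by
  obtain ⟨h2, hm, hn⟩ := h
  obtain ⟨k, hk⟩ := (PySem.Int.mod_eq_zero_iff_dvd n f).mp hm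
  have hf : f ≠ 0 := by rintro rfl; simp at h2
  have hq : PySem.Int.floordiv n f = k := by
    simp [PySem.Int.floordiv, hk, Int.mul_fdiv_cancel_left _ hf]
  have hk0 : k ≠ 0 := by rintro rfl; simp at hk; exact hn hk
  have : n.natAbs = f.natAbs * k.natAbs := by rw [hk, Int.natAbs_mul]
  have hk1 : 1 ≤ k.natAbs := Int.natAbs_pos.mpr hk0
  rw [hq]
  nlinarith

-- ===== PORT A =====
-- A's inner while loop: strip all powers of f from n; returns (residual n, whether the body ran
-- at least once, i.e. whether f was added to ret).
-- The Python condition is the float test 'n / f == n // f', which on the stated domain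
-- (|n| ≤ 2^31 < 2^53) holds exactly when f divides n; the extra '2 ≤ |f| ∧ n ≠ 0' conjuncts
-- are the totality guard (Python diverges for f ∈ {-1,1} or n = 0, raises for f = 0 —
-- all excluded by Pre_get_que) and always hold when the loop is reached inside Pre_.
def pvStripA (n f : Int) : Int × Bool :=
  if h : 2 ≤ f.natAbs ∧ PySem.Int.mod n f = 0 ∧ n ≠ 0 then
    ((pvStripA (PySem.Int.floordiv n f) f).1, true)
  else (n, false)
termination_by n.natAbs
decreasing_by exact pvStripDec h

-- A's first loop: trial division over factors, collecting ret : set.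
def pvLoopA (n : Int) (ret : PySem.Set Int) : List Int → Int × PySem.Set Int
  | [] => (n, ret)
  | f :: fs =>
    if n ≤ 1 then (n, ret)
    else
      let s := pvStripA n f
      pvLoopA s.1 (if s.2 then PySem.Set.add ret f else ret) fs

-- A's second loop multiplies primes[j] over the set ret; set iteration order does not affect an
-- integer product, so folding in insertion order is exact. primes[j] would raise KeyError on a
-- missing key (excluded by Pre_get_que); getD 0 is the total form.
def get_que (n : Int) (primes : List (Int × Int)) (factors : List Int) : Int :=
  ((pvLoopA n PySem.Set.empty factors).2).foldl
    (fun a j => a * (PySem.Dict.mk primes).getD j 0) 1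

-- ===== PORT B =====
-- B's single stateless pass: return 1 for n <= 1, otherwise multiply primes[f] for each factor
-- dividing the original n. primes[f] would raise KeyError on a missing key (excluded by
-- Pre_get_que); getD 0 is the total form.
def get_que_alt (n : Int) (primes : List (Int × Int)) (factors : List Int) : Int :=
  if n ≤ 1 then 1
  else factors.foldl
    (fun a f => if PySem.Int.mod n f = 0 then a * (PySem.Dict.mk primes).getD f 0 else a) 1

-- ===== PRECONDITION & SPEC =====
-- Pre_ excludes Python crashes and restricts the ACTING factors to the natural domain: no factor
-- may be 0 (ZeroDivisionError in both programs) and every factor DIVIDING n must be ≥ 2 (±1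
-- always divide and make A loop forever; a negative dividing factor is malformed input — not a
-- candidate prime — on which A's sign-flipping sequential stripping gives accidental
-- order-dependent values B does not reproduce, see cites), pairwise coprime among the dividing
-- factors (duplicate/non-coprime dividing factors are likewise malformed and order-dependent,
-- see cites) and a key of primes (otherwise KeyError). Factors NOT dividing n are unconstrained
-- (they are no-ops in both programs), and for n ≤ 1 nothing is required (A breaks immediately).
def Pre_get_que (n : Int) (primes : List (Int × Int)) (factors : List Int) : Prop :=
  n ≤ 1 ∨ ((∀ f ∈ factors, f ≠ 0 ∧ (PySem.Int.mod n f = 0 → 2 ≤ f)) ∧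
    factors.Pairwise (fun a b => PySem.Int.mod n a = 0 → PySem.Int.mod n b = 0 → Int.gcd a b = 1) ∧
    ∀ f ∈ factors, PySem.Int.mod n f = 0 → f ∈ primes.map Prod.fst)
instance (n : Int) (primes : List (Int × Int)) (factors : List Int) : Decidable (Pre_get_que n primes factors) := by unfold Pre_get_que; infer_instance

def pvWitness_get_que : Int × (List (Int × Int)) × List Int := (10, [(2, 3), (5, 7)], [2, 3, 5])

def Spec_get_que (n : Int) (primes : List (Int × Int)) (factors : List Int) (out : Int) : Prop := out = get_que_alt n primes factors
instance (n : Int) (primes : List (Int × Int)) (factors : List Int) (out : Int) : Decidable (Spec_get_que n primes factors out) := by unfold Spec_get_que; infer_instance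

-- ===== CLAIM (what is proved, stated in full; the proofs are below) =====
def Claim_equal_get_que : Prop := ∀ (n : Int) (primes : List (Int × Int)) (factors : List Int), Dom_get_que n primes factors → Pre_get_que n primes factors → Spec_get_que n primes factors (get_que n primes factors)

-- ===== LEMMAS AND PROOFS =====

-- the product A's second loop computes, as a function of the set's element list
def pvProd (primes : List (Int × Int)) (s : List Int) (a : Int) : Int :=
  s.foldl (fun a j => a * (PySem.Dict.mk primes).getD j 0) a

-- B's loop as a function of the starting accumulator
def pvB (primes : List (Int × Int)) (n : Int) (fs : List Int) (a : Int) : Int :=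
  fs.foldl (fun a f => if PySem.Int.mod n f = 0 then a * (PySem.Dict.mk primes).getD f 0 else a) a

theorem pvFloordivExact {n f : Int} (hf : f ≠ 0) (hd : f ∣ n) :
    f * PySem.Int.floordiv n f = n := by
  obtain ⟨k, rfl⟩ := hd
  simp [PySem.Int.floordiv, Int.mul_fdiv_cancel_left _ hf]

theorem pvStripA_fst_dvd (n f : Int) : (pvStripA n f).1 ∣ n := by
  rw [pvStripA]
  by_cases h : 2 ≤ f.natAbs ∧ PySem.Int.mod n f = 0 ∧ n ≠ 0
  · rw [dif_pos h]
    have hf : f ≠ 0 := by rintro rfl; simp at h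
    have hdvd : PySem.Int.floordiv n f ∣ n :=
      ⟨f, by rw [mul_comm]; exact (pvFloordivExact hf ((PySem.Int.mod_eq_zero_iff_dvd n f).mp h.2.1)).symm⟩
    exact dvd_trans (pvStripA_fst_dvd _ f) hdvd
  · rw [dif_neg h]
termination_by n.natAbs
decreasing_by exact pvStripDec h

theorem pvStripA_pow (n f : Int) : ∃ k : ℕ, n = f ^ k * (pvStripA n f).1 := by
  rw [pvStripA]
  by_cases h : 2 ≤ f.natAbs ∧ PySem.Int.mod n f = 0 ∧ n ≠ 0
  · rw [dif_pos h]
    obtain ⟨k, hk⟩ := pvStripA_pow (PySem.Int.floordiv n f) f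
    refine ⟨k + 1, ?_⟩
    have hf : f ≠ 0 := by rintro rfl; simp at h
    have he := pvFloordivExact hf ((PySem.Int.mod_eq_zero_iff_dvd n f).mp h.2.1)
    calc n = f * PySem.Int.floordiv n f := he.symm
    _ = f * (f ^ k * (pvStripA (PySem.Int.floordiv n f) f).1) := by rw [← hk]
    _ = f ^ (k + 1) * (pvStripA (PySem.Int.floordiv n f) f).1 := by ring
  · rw [dif_neg h]
    exact ⟨0, by simp⟩
termination_by n.natAbs
decreasing_by exact pvStripDec h

theorem pvStripA_pos (n f : Int) (hn : 0 < n) (hf : 2 ≤ f) : 0 < (pvStripA n f).1 := by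
  rw [pvStripA]
  by_cases h : 2 ≤ f.natAbs ∧ PySem.Int.mod n f = 0 ∧ n ≠ 0
  · rw [dif_pos h]
    have hf0 : f ≠ 0 := by omega
    have he := pvFloordivExact hf0 ((PySem.Int.mod_eq_zero_iff_dvd n f).mp h.2.1)
    have hq : 0 < PySem.Int.floordiv n f := by nlinarith
    exact pvStripA_pos _ f hq hf
  · rw [dif_neg h]; exact hn
termination_by n.natAbs
decreasing_by exact pvStripDec h

theorem pvStripA_not_dvd (n f : Int) (h2 : 2 ≤ f.natAbs) (hn : n ≠ 0) :
    ¬ f ∣ (pvStripA n f).1 := by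
  rw [pvStripA]
  by_cases hd : PySem.Int.mod n f = 0
  · rw [dif_pos ⟨h2, hd, hn⟩]
    have hf : f ≠ 0 := by rintro rfl; simp at h2
    have hdd : f ∣ n := (PySem.Int.mod_eq_zero_iff_dvd n f).mp hd
    have hfd : PySem.Int.floordiv n f ≠ 0 := by
      intro h0
      exact hn (by rw [← pvFloordivExact hf hdd, h0, mul_zero])
    exact pvStripA_not_dvd _ f h2 hfd
  · rw [dif_neg (by tauto)]
    exact fun hdd => hd ((PySem.Int.mod_eq_zero_iff_dvd n f).mpr hdd)
termination_by n.natAbs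
decreasing_by exact pvStripDec ⟨h2, hd, hn⟩

-- dividing by powers of f does not change divisibility by anything coprime to f
theorem pvStripA_dvd_iff (n f g : Int) (hcop : Int.gcd g f = 1) :
    g ∣ (pvStripA n f).1 ↔ g ∣ n := by
  obtain ⟨k, hk⟩ := pvStripA_pow n f
  constructor
  · intro h; rw [hk]; exact h.mul_left _
  · intro h
    rw [hk] at h
    have hc : IsCoprime g (f ^ k) := (Int.isCoprime_iff_gcd_eq_one.mpr hcop).pow_right
    exact hc.dvd_of_dvd_mul_left h

theorem pvB_congr (primes : List (Int × Int)) (n m : Int) (fs : List Int)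
    (h : ∀ f ∈ fs, (PySem.Int.mod n f = 0 ↔ PySem.Int.mod m f = 0)) (a : Int) :
    pvB primes n fs a = pvB primes m fs a := by
  induction fs generalizing a with
  | nil => rfl
  | cons f fs ih =>
    simp only [pvB, List.foldl] at *
    rw [show (if PySem.Int.mod n f = 0 then a * (PySem.Dict.mk primes).getD f 0 else a)
          = (if PySem.Int.mod m f = 0 then a * (PySem.Dict.mk primes).getD f 0 else a) by
        by_cases hc : PySem.Int.mod m f = 0
        · rw [if_pos hc, if_pos ((h f (by simp)).mpr hc)]
        · rw [if_neg hc, if_neg (fun hx => hc ((h f (by simp)).mp hx))]]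
    exact ih (fun g hg => h g (by simp [hg])) _

theorem pvB_false (primes : List (Int × Int)) (n : Int) (fs : List Int)
    (h : ∀ f ∈ fs, PySem.Int.mod n f ≠ 0) (a : Int) :
    pvB primes n fs a = a := by
  induction fs generalizing a with
  | nil => rfl
  | cons f fs ih =>
    simp only [pvB, List.foldl]
    rw [if_neg (h f (by simp))]
    exact ih (fun g hg => h g (by simp [hg])) _

theorem pvMain (primes : List (Int × Int)) :
    ∀ (fs : List Int) (n : Int) (ret : PySem.Set Int) (a : Int),
      0 < n →
      (∀ f ∈ fs, PySem.Int.mod n f = 0 → 2 ≤ f) →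
      fs.Pairwise (fun a b => PySem.Int.mod n a = 0 → PySem.Int.mod n b = 0 → Int.gcd a b = 1) →
      (∀ f ∈ fs, f ∉ ret) →
      pvProd primes (pvLoopA n ret fs).2 a = pvB primes n fs (pvProd primes ret a) := by
  intro fs
  induction fs with
  | nil => intro n ret a _ _ _ _; rfl
  | cons f fs ih =>
    intro n ret a hn hge hpw hnotin
    by_cases h1 : n ≤ 1
    · -- n = 1: A breaks; no factor can divide, so B's loop is a no-op
      have hfalse : ∀ g ∈ f :: fs, PySem.Int.mod n g ≠ 0 := by
        intro g hg hmod
        have h2 := hge g hg hmod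
        have hle := Int.le_of_dvd (by omega) ((PySem.Int.mod_eq_zero_iff_dvd n g).mp hmod)
        omega
      simp only [pvLoopA, if_pos h1]
      rw [pvB_false primes n _ hfalse]
    · have hn0 : n ≠ 0 := by omega
      have hdvd_of : ∀ g m : Int, m ∣ n → PySem.Int.mod m g = 0 → PySem.Int.mod n g = 0 := by
        intro g m hmn hg
        exact (PySem.Int.mod_eq_zero_iff_dvd n g).mpr
          (dvd_trans ((PySem.Int.mod_eq_zero_iff_dvd m g).mp hg) hmn)
      by_cases hd : PySem.Int.mod n f = 0
      · -- f divides n: A strips all powers of f and adds f; B multiplies primes[f] once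
        have hf2 : 2 ≤ f := hge f (by simp) hd
        have hf2' : 2 ≤ f.natAbs := by omega
        have hgA : 2 ≤ f.natAbs ∧ PySem.Int.mod n f = 0 ∧ n ≠ 0 := ⟨hf2', hd, hn0⟩
        have hsA : pvStripA n f = ((pvStripA (PySem.Int.floordiv n f) f).1, true) := by
          rw [pvStripA, dif_pos hgA]
        have hs2 : (pvStripA n f).2 = true := by rw [hsA]
        have hfret : f ∉ ret := hnotin f (by simp)
        have hadd : PySem.Set.add ret f = ret ++ [f] := by
          simp only [PySem.Set.add]
          rw [if_neg (by simpa using hfret)]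
        have hcop : ∀ g ∈ fs, PySem.Int.mod n g = 0 → Int.gcd g f = 1 := by
          intro g hg hgd
          have := (List.pairwise_cons.mp hpw).1 g hg hd hgd
          rwa [Int.gcd_comm]
        have hstripdvd : (pvStripA n f).1 ∣ n := pvStripA_fst_dvd n f
        have hiff : ∀ g ∈ fs, (PySem.Int.mod (pvStripA n f).1 g = 0 ↔ PySem.Int.mod n g = 0) := by
          intro g hg
          constructor
          · exact hdvd_of g _ hstripdvd
          · intro hgd
            rw [PySem.Int.mod_eq_zero_iff_dvd]
            exact (pvStripA_dvd_iff n f g (hcop g hg hgd)).mpr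
              ((PySem.Int.mod_eq_zero_iff_dvd n g).mp hgd)
        have hpos : 0 < (pvStripA n f).1 := pvStripA_pos n f (by omega) hf2
        have hnotin' : ∀ g ∈ fs, g ∉ (ret ++ [f] : List Int) := by
          intro g hg hmem
          rcases List.mem_append.mp hmem with hm | hm
          · exact hnotin g (by simp [hg]) hm
          · simp at hm
            subst hm
            have := (List.pairwise_cons.mp hpw).1 g hg hd hd
            simp [Int.gcd_self] at this
            omega
        have hge' : ∀ g ∈ fs, PySem.Int.mod (pvStripA n f).1 g = 0 → 2 ≤ g := by
          intro g hg hgd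
          exact hge g (by simp [hg]) ((hiff g hg).mp hgd)
        have hpw' : fs.Pairwise
            (fun a b => PySem.Int.mod (pvStripA n f).1 a = 0 →
              PySem.Int.mod (pvStripA n f).1 b = 0 → Int.gcd a b = 1) := by
          refine ((List.pairwise_cons.mp hpw).2).imp_of_mem ?_
          intro a b ha hb hab hda hdb
          exact hab ((hiff a ha).mp hda) ((hiff b hb).mp hdb)
        have hIH := ih (pvStripA n f).1 (ret ++ [f]) a hpos hge' hpw' hnotin'
        simp only [pvLoopA, if_neg h1, hs2, if_pos, hadd]
        rw [hIH, pvB_congr primes (pvStripA n f).1 n fs hiff]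
        simp only [pvB, List.foldl, if_pos hd]
        congr 1
        simp [pvProd]
      · -- f does not divide n: both sides skip f
        have hsA : pvStripA n f = (n, false) := by
          rw [pvStripA, dif_neg (by tauto)]
        have hIH := ih n ret a (by omega) (fun g hg => hge g (by simp [hg]))
          (List.pairwise_cons.mp hpw).2 (fun g hg => hnotin g (by simp [hg]))
        simp only [pvLoopA, if_neg h1, hsA]
        simp only [pvB, List.foldl, if_neg hd] at *
        exact hIH

theorem pvLoopA_break (n : Int) (ret : PySem.Set Int) (fs : List Int) (h : n ≤ 1) :
    (pvLoopA n ret fs).2 = ret := by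
  cases fs with
  | nil => rfl
  | cons f fs => simp [pvLoopA, if_pos h]

-- ===== VERDICT (by name: the statement is the Claim_ definition above) =====
theorem get_que_spec : Claim_equal_get_que := by
  intro n primes factors _ hpre
  unfold Spec_get_que get_que get_que_alt
  by_cases h1 : n ≤ 1
  · rw [pvLoopA_break n _ factors h1, if_pos h1]
    rfl
  · rcases hpre with h | ⟨hne, hpw, _⟩
    · omega
    · rw [if_neg h1]
      have h := pvMain primes factors n PySem.Set.empty 1 (by omega)
        (fun f hf => (hne f hf).2) hpw
        (by intro g hg; simp [PySem.Set.empty])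
      simpa [pvProd, pvB, PySem.Set.empty] using h
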